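-- pv_equiv track=rewrite | github.com/951237/TIL | TIL_2023/2023 GTPC/231021_본선문제 및 풀이/f1.py | binary_mutation
-- ===== SOURCE A (Python) =====
-- def binary_mutation(binary_string):
--     while '0' in binary_string:
--         index = binary_string.rfind('0')
--         binary_string = binary_string[:index] + '1' + binary_string[index + 1:]
--         yield binary_string
--
--     # Check for adjacent 0's and change them to 1's
--     while '00' in binary_string:
--         index = binary_string.rfind('00')
--         binary_string = binary_string[:index] + '11' + binary_string[index + 2:]
--         yield binary_string
-- ===== SOURCE B (Python) =====
-- def binary_mutation(binary_string):
--     # One reverse pass: flip each '0' in place, emit the joined string at each flip.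
--     chars = list(binary_string)
--     out = []
--     for i in range(len(chars) - 1, -1, -1):
--         if chars[i] == '0':
--             chars[i] = '1'
--             out.append(''.join(chars))
--     return out
-- ===== Notes on version B (the rewrite author's own statement) =====
-- stated objective: simpler
-- what changed: B makes one reverse index pass over a char list, flipping each zero character in place and joining at each flip, instead of A's repeated whole-string rfind scans with slice-rebuilding; A's dead second double-zero loop disappears.
import Mathlib
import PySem

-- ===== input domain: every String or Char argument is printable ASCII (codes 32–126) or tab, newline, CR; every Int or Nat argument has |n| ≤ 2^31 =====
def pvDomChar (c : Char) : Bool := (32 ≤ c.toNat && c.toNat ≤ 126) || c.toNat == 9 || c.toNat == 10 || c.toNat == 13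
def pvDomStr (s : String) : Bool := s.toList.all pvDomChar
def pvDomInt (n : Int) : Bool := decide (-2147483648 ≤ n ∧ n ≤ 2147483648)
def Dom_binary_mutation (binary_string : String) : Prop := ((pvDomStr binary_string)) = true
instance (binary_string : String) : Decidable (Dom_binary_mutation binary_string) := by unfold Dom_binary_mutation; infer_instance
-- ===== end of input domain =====

-- B replaces A's repeated whole-string rfind scans (and never reaches A's dead second
-- loop) by a single pass over the reversed string that flips each '0' as it is met
-- (objective: simpler).

-- Helper lemmas cited by port A's termination proof (rfind really hits a '0' / "00",
-- so the number of '0' characters strictly decreases at each while-loop iteration).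

theorem pv_go_zero (s sub : List Char) :
    PySem.Chars.rfind.go s sub 0 = if sub.isPrefixOf s then 0 else -1 := rfl

theorem pv_go_succ (s sub : List Char) (j : Nat) :
    PySem.Chars.rfind.go s sub (j + 1)
      = if sub.isPrefixOf (s.drop (j + 1)) then ((j + 1 : Nat) : Int)
        else PySem.Chars.rfind.go s sub j := rfl

theorem pv_rfind_go_mem (s sub : List Char) :
    ∀ k : Nat, (∃ j, j ≤ k ∧ sub <+: s.drop j) →
      ∃ r : Nat, r ≤ k ∧ PySem.Chars.rfind.go s sub k = (r : Int) ∧ sub <+: s.drop r := by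
  intro k
  induction k with
  | zero =>
    rintro ⟨j, hj, hp⟩
    interval_cases j
    refine ⟨0, le_refl _, ?_, by simpa using hp⟩
    rw [pv_go_zero, if_pos (List.isPrefixOf_iff_prefix.mpr (by simpa using hp))]
    simp
  | succ k ih =>
    rintro ⟨j, hj, hp⟩
    by_cases hk : sub <+: s.drop (k + 1)
    · exact ⟨k + 1, le_refl _,
        by rw [pv_go_succ, if_pos (List.isPrefixOf_iff_prefix.mpr hk)], hk⟩
    · have hj' : j ≤ k := by
        by_contra hgt
        have hje : j = k + 1 := by omega
        exact hk (hje ▸ hp)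
      obtain ⟨r, hr, hgo, hpr⟩ := ih ⟨j, hj', hp⟩
      refine ⟨r, by omega, ?_, hpr⟩
      rw [pv_go_succ, if_neg (fun hc => hk (List.isPrefixOf_iff_prefix.mp hc)), hgo]

theorem pv_rfind_mem (s sub : List Char) (hne : sub ≠ [])
    (h : ∃ j, sub <+: s.drop j) :
    ∃ r : Nat, r ≤ s.length ∧ PySem.Chars.rfind s sub = (r : Int) ∧ sub <+: s.drop r := by
  obtain ⟨j, hp⟩ := h
  have hj : j ≤ s.length := by
    by_contra hgt
    have hd : s.drop j = [] := List.drop_eq_nil_of_le (by omega)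
    rw [hd] at hp
    exact hne (List.prefix_nil.mp hp)
  exact pv_rfind_go_mem s sub s.length ⟨j, hj, hp⟩

theorem pv_infix_drop (s sub : List Char) (h : sub <:+: s) : ∃ j, sub <+: s.drop j := by
  obtain ⟨pre, suf, hps⟩ := h
  refine ⟨pre.length, ?_⟩
  rw [← hps, List.append_assoc, List.drop_left]
  exact List.prefix_append _ _

theorem pv_count_dec1 (s : List Char) (h : PySem.Chars.isIn ['0'] s = true) :
    (PySem.Chars.slice s none (some (PySem.Chars.rfind s ['0'])) ++ ['1'] ++
      PySem.Chars.slice s (some (PySem.Chars.rfind s ['0'] + 1)) none).count '0' < s.count '0' := by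
  have hinf := (PySem.Chars.isIn_iff_infix _ _).mp h
  obtain ⟨r, hr, hrf, hpr⟩ := pv_rfind_mem s ['0'] (by simp) (pv_infix_drop s ['0'] hinf)
  obtain ⟨t, ht⟩ := hpr
  rw [hrf]
  have h1 : PySem.Chars.slice s none (some ((r : Int))) = s.take r := by
    simpa using PySem.List.slice_to_natCast s r
  have h2 : PySem.Chars.slice s (some ((r : Int) + 1)) none = s.drop (r + 1) := by
    have h3 := PySem.List.slice_from_natCast s (r + 1)
    rw [show (((r + 1 : Nat)) : Int) = ((r : Nat) : Int) + 1 by push_cast; ring] at h3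
    simpa using h3
  have hdrop : s.drop r = '0' :: t := by rw [← ht]; simp
  have hdrop1 : s.drop (r + 1) = t := by
    have h4 := congrArg (List.drop 1) hdrop
    rw [List.drop_drop] at h4
    simpa [show 1 + r = r + 1 by omega] using h4
  have hs : s = s.take r ++ '0' :: t := by rw [← hdrop, List.take_append_drop]
  rw [h1, h2, hdrop1]
  conv_rhs => rw [hs]
  simp [List.count_append]

theorem pv_count_dec2 (s : List Char) (h : PySem.Chars.isIn ['0', '0'] s = true) :
    (PySem.Chars.slice s none (some (PySem.Chars.rfind s ['0', '0'])) ++ ['1', '1'] ++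
      PySem.Chars.slice s (some (PySem.Chars.rfind s ['0', '0'] + 2)) none).count '0' < s.count '0' := by
  have hinf := (PySem.Chars.isIn_iff_infix _ _).mp h
  obtain ⟨r, hr, hrf, hpr⟩ := pv_rfind_mem s ['0', '0'] (by simp) (pv_infix_drop s ['0', '0'] hinf)
  obtain ⟨t, ht⟩ := hpr
  rw [hrf]
  have h1 : PySem.Chars.slice s none (some ((r : Int))) = s.take r := by
    simpa using PySem.List.slice_to_natCast s r
  have h2 : PySem.Chars.slice s (some ((r : Int) + 2)) none = s.drop (r + 2) := by
    have h3 := PySem.List.slice_from_natCast s (r + 2)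
    rw [show (((r + 2 : Nat)) : Int) = ((r : Nat) : Int) + 2 by push_cast; ring] at h3
    simpa using h3
  have hdrop : s.drop r = '0' :: '0' :: t := by rw [← ht]; simp
  have hdrop2 : s.drop (r + 2) = t := by
    have h4 := congrArg (List.drop 2) hdrop
    rw [List.drop_drop] at h4
    simpa [show 2 + r = r + 2 by omega] using h4
  have hs : s = s.take r ++ '0' :: '0' :: t := by rw [← hdrop, List.take_append_drop]
  rw [h1, h2, hdrop2]
  conv_rhs => rw [hs]
  simp [List.count_append]

-- ===== PORT A =====
-- A's two `while` loops over the running string, transliterated over the code-point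
-- list (PySem.Chars.isIn / rfind / slice are exact for str `in` / rfind / slicing);
-- each loop returns (the yielded strings, the final string).
def aLoop1 (s : List Char) : List (List Char) × List Char :=
  if h : PySem.Chars.isIn ['0'] s = true then
    let index := PySem.Chars.rfind s ['0']
    let s' := PySem.Chars.slice s none (some index) ++ ['1'] ++
              PySem.Chars.slice s (some (index + 1)) none
    let p := aLoop1 s'
    (s' :: p.1, p.2)
  else ([], s)
termination_by s.count '0'
decreasing_by exact pv_count_dec1 s h

def aLoop2 (s : List Char) : List (List Char) × List Char :=
  if h : PySem.Chars.isIn ['0', '0'] s = true then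
    let index := PySem.Chars.rfind s ['0', '0']
    let s' := PySem.Chars.slice s none (some index) ++ ['1', '1'] ++
              PySem.Chars.slice s (some (index + 2)) none
    let p := aLoop2 s'
    (s' :: p.1, p.2)
  else ([], s)
termination_by s.count '0'
decreasing_by exact pv_count_dec2 s h

def binary_mutation (binary_string : String) : List String :=
  let p1 := aLoop1 binary_string.toList
  let p2 := aLoop2 p1.2
  (p1.1 ++ p2.1).map String.ofList

-- ===== PORT B =====
-- Source B's single `for i in range(len(chars)-1, -1, -1)` over the char list, ported as
-- countdown recursion on the loop counter (i+1 ↦ body at index i, then i); the index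
-- is always in range, so chars[i] is List.getElem? (exact); list(...)/''.join are
-- toList/String.ofList (exact).
def bLoop : List Char → Nat → List String
  | _, 0 => []
  | chars, i + 1 =>
    if chars[i]? = some '0' then
      let chars' := chars.set i '1'
      String.ofList chars' :: bLoop chars' i
    else bLoop chars i

def binary_mutation_alt (binary_string : String) : List String :=
  bLoop binary_string.toList binary_string.toList.length

-- ===== PRECONDITION & SPEC =====
def Spec_binary_mutation (binary_string : String) (out : List String) : Prop := out = binary_mutation_alt binary_string
instance (binary_string : String) (out : List String) : Decidable (Spec_binary_mutation binary_string out) := by unfold Spec_binary_mutation; infer_instance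

-- ===== CLAIM (what is proved, stated in full; the proofs are below) =====
def Claim_equal_binary_mutation : Prop := ∀ (binary_string : String), Dom_binary_mutation binary_string → Spec_binary_mutation binary_string (binary_mutation binary_string)

-- ===== LEMMAS AND PROOFS =====
theorem pv_drop_mid (u v : List Char) (c : Char) (k : Nat) (hk : u.length ≤ k) :
    (u ++ c :: v).drop (k + 1) = v.drop (k - u.length) := by
  have h1 : (u ++ c :: v).drop (u.length + 1) = v := by
    rw [show u ++ c :: v = (u ++ [c]) ++ v by simp,
      show u.length + 1 = (u ++ [c]).length by simp, List.drop_left]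
  calc (u ++ c :: v).drop (k + 1)
      = ((u ++ c :: v).drop (u.length + 1)).drop (k - u.length) := by
        rw [List.drop_drop]; congr 1; omega
    _ = v.drop (k - u.length) := by rw [h1]

theorem pv_rfind_last (u v : List Char) (hv : '0' ∉ v) :
    PySem.Chars.rfind (u ++ '0' :: v) ['0'] = (u.length : Int) := by
  have hgo : ∀ k, u.length ≤ k → k ≤ (u ++ '0' :: v).length →
      PySem.Chars.rfind.go (u ++ '0' :: v) ['0'] k = (u.length : Int) := by
    intro k hk
    induction k, hk using Nat.le_induction with
    | base =>
      intro _
      have hgen : ∀ kk : Nat, kk = u.length →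
          PySem.Chars.rfind.go (u ++ '0' :: v) ['0'] kk = (u.length : Int) := by
        intro kk hkk
        cases kk with
        | zero =>
          have hu : u = [] := List.length_eq_zero_iff.mp hkk.symm
          subst hu
          rw [pv_go_zero, if_pos (by simp)]
          simp
        | succ m =>
          have h1 : (u ++ '0' :: v).drop (m + 1) = '0' :: v := by
            rw [hkk, List.drop_left]
          rw [pv_go_succ, h1, if_pos (by simp), hkk]
      exact hgen u.length rfl
    | succ k hk ih =>
      intro hlen
      have hnp : ¬ (['0'].isPrefixOf ((u ++ '0' :: v).drop (k + 1)) = true) := by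
        intro hc
        have hp := List.isPrefixOf_iff_prefix.mp hc
        have hmem : '0' ∈ (u ++ '0' :: v).drop (k + 1) := hp.sublist.mem (by simp)
        rw [pv_drop_mid u v '0' k hk] at hmem
        exact hv (List.mem_of_mem_drop hmem)
      rw [pv_go_succ, if_neg hnp]
      exact ih (Nat.le_of_succ_le hlen)
  exact hgo _ (by simp) (le_refl _)

-- bGo is a proof-side reformulation of B's loop: recursion over the reversed prefix
-- still to process, carrying the already-flipped suffix `done`.
def bGo : List Char → List Char → List String
  | [], _ => []
  | c :: rest, done =>
    if c = '0' then String.ofList (rest.reverse ++ '1' :: done) :: bGo rest ('1' :: done)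
    else bGo rest (c :: done)

theorem pv_bLoop_eq_bGo (r : List Char) : ∀ v : List Char, bLoop (r.reverse ++ v) r.length = bGo r v := by
  induction r with
  | nil => intro v; simp [bLoop, bGo]
  | cons c rs ih =>
    intro v
    have hlen : rs.reverse.length = rs.length := by simp
    have hget : (rs.reverse ++ c :: v)[rs.length]? = some c := by
      rw [← hlen, List.getElem?_append_right (le_refl _)]
      simp
    have hset : (rs.reverse ++ c :: v).set rs.length '1' = rs.reverse ++ '1' :: v := by
      rw [← hlen, List.set_append_right _ _ (le_refl _)]
      simp
    rw [show (c :: rs).reverse ++ v = rs.reverse ++ c :: v by simp,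
      show (c :: rs).length = rs.length + 1 from rfl]
    by_cases hc : c = '0'
    · subst hc
      rw [show bLoop (rs.reverse ++ '0' :: v) (rs.length + 1)
            = String.ofList ((rs.reverse ++ '0' :: v).set rs.length '1')
              :: bLoop ((rs.reverse ++ '0' :: v).set rs.length '1') rs.length by
          simp [bLoop, hget]]
      rw [hset, show bGo ('0' :: rs) v
            = String.ofList (rs.reverse ++ '1' :: v) :: bGo rs ('1' :: v) by simp [bGo]]
      rw [show rs.reverse ++ '1' :: v = rs.reverse.reverse.reverse ++ '1' :: v by simp] at *
      exact congrArg₂ _ rfl (by simpa using ih ('1' :: v))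
    · rw [show bLoop (rs.reverse ++ c :: v) (rs.length + 1) = bLoop (rs.reverse ++ c :: v) rs.length by
          simp [bLoop, hget, hc]]
      rw [show bGo (c :: rs) v = bGo rs (c :: v) by simp [bGo, hc]]
      exact ih (c :: v)

theorem pv_alt_eq_bGo (s : String) : binary_mutation_alt s = bGo s.toList.reverse [] := by
  unfold binary_mutation_alt
  have h := pv_bLoop_eq_bGo s.toList.reverse []
  simpa using h

theorem pv_singleton_infix (c : Char) (l : List Char) : [c] <:+: l ↔ c ∈ l := by
  constructor
  · intro h; exact h.sublist.mem (by simp)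
  · intro h
    obtain ⟨u, v, huv⟩ := List.mem_iff_append.mp h
    exact ⟨u, v, by simp [huv]⟩

def pvFlip (c : Char) : Char := if c = '0' then '1' else c

theorem pv_flip_ne_zero (c : Char) : pvFlip c ≠ '0' := by
  unfold pvFlip; split_ifs with h
  · decide
  · exact h

theorem pv_aLoop1_eq (r : List Char) : ∀ done : List Char, '0' ∉ done →
    (aLoop1 (r.reverse ++ done)).1.map String.ofList = bGo r done ∧
    (aLoop1 (r.reverse ++ done)).2 = (r.map pvFlip).reverse ++ done := by
  induction r with
  | nil =>
    intro done hd
    have hin : PySem.Chars.isIn ['0'] done = false := by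
      rcases Bool.eq_false_or_eq_true (PySem.Chars.isIn ['0'] done) with h | h
      · exact absurd ((pv_singleton_infix _ _).mp ((PySem.Chars.isIn_iff_infix _ _).mp h)) hd
      · exact h
    rw [show ([] : List Char).reverse ++ done = done by simp]
    rw [aLoop1]
    simp [hin, bGo]
  | cons c rs ih =>
    intro done hd
    rw [show (c :: rs).reverse ++ done = rs.reverse ++ c :: done by simp]
    by_cases hc : c = '0'
    · subst hc
      have hin : PySem.Chars.isIn ['0'] (rs.reverse ++ '0' :: done) = true :=
        (PySem.Chars.isIn_iff_infix _ _).mpr ((pv_singleton_infix _ _).mpr (by simp))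
      have hrf : PySem.Chars.rfind (rs.reverse ++ '0' :: done) ['0']
          = (rs.reverse.length : Int) := pv_rfind_last rs.reverse done hd
      have h1 : PySem.Chars.slice (rs.reverse ++ '0' :: done) none
          (some ((rs.reverse.length : Nat) : Int)) = rs.reverse := by
        have := PySem.List.slice_to_natCast (rs.reverse ++ '0' :: done) rs.reverse.length
        simpa [List.take_left] using this
      have h2 : PySem.Chars.slice (rs.reverse ++ '0' :: done)
          (some (((rs.reverse.length : Nat) : Int) + 1)) none = done := by
        have h3 := PySem.List.slice_from_natCast (rs.reverse ++ '0' :: done) (rs.reverse.length + 1)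
        rw [show (((rs.reverse.length + 1 : Nat)) : Int)
              = ((rs.reverse.length : Nat) : Int) + 1 by push_cast; ring] at h3
        have hdd : List.drop (rs.reverse.length + 1) (rs.reverse ++ '0' :: done) = done := by
          rw [show rs.reverse ++ '0' :: done = (rs.reverse ++ ['0']) ++ done by simp,
            show rs.reverse.length + 1 = (rs.reverse ++ ['0']).length by simp, List.drop_left]
        rw [hdd] at h3
        simpa using h3
      have ih' := ih ('1' :: done) (by simp [hd])
      rw [aLoop1]
      rw [dif_pos hin]
      simp only [hrf, h1, h2]
      refine ⟨?_, ?_⟩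
      · simp only [List.map_cons]
        rw [show bGo ('0' :: rs) done
              = String.ofList (rs.reverse ++ '1' :: done) :: bGo rs ('1' :: done) by
            simp [bGo]]
        refine congrArg₂ _ (by simp) ?_
        have h4 := ih'.1
        rw [show rs.reverse ++ ['1'] ++ done = rs.reverse ++ '1' :: done by simp]
        exact h4
      · have h4 := ih'.2
        rw [show rs.reverse ++ ['1'] ++ done = rs.reverse ++ '1' :: done by simp, h4]
        simp [pvFlip]
    · have ih' := ih (c :: done) (by
        intro hmem
        rcases List.mem_cons.mp hmem with h | h
        · exact hc h.symm
        · exact hd h)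
      refine ⟨?_, ?_⟩
      · rw [show bGo (c :: rs) done = bGo rs (c :: done) by simp [bGo, hc]]
        exact ih'.1
      · rw [ih'.2]
        simp [pvFlip, hc]

theorem pv_aLoop2_nil (t : List Char) (h : PySem.Chars.isIn ['0', '0'] t = false) :
    aLoop2 t = ([], t) := by
  rw [aLoop2]
  rw [dif_neg (by simp [h])]

theorem pv_no_zero_final (l : List Char) : '0' ∉ (l.map pvFlip).reverse ++ ([] : List Char) := by
  simp only [List.append_nil, List.mem_reverse, List.mem_map]
  rintro ⟨c, _, hc⟩
  exact pv_flip_ne_zero c hc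

-- ===== VERDICT (by name: the statement is the Claim_ definition above) =====
theorem binary_mutation_spec : Claim_equal_binary_mutation := by
  intro s _
  unfold Spec_binary_mutation
  rw [pv_alt_eq_bGo]
  have hmain := pv_aLoop1_eq s.toList.reverse [] (by simp)
  rw [show s.toList.reverse.reverse ++ [] = s.toList by simp] at hmain
  have hnz : '0' ∉ (aLoop1 s.toList).2 := by
    rw [hmain.2]; exact pv_no_zero_final s.toList.reverse
  have hin2 : PySem.Chars.isIn ['0', '0'] (aLoop1 s.toList).2 = false := by
    rcases Bool.eq_false_or_eq_true (PySem.Chars.isIn ['0', '0'] (aLoop1 s.toList).2) with h | h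
    · exact absurd (((PySem.Chars.isIn_iff_infix _ _).mp h).sublist.mem (by simp)) hnz
    · exact h
  show ((aLoop1 s.toList).1 ++ (aLoop2 (aLoop1 s.toList).2).1).map String.ofList
      = bGo s.toList.reverse []
  rw [pv_aLoop2_nil _ hin2]
  simpa using hmain.1
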